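-- pv_equiv track=rewrite | github.com/tomoreal/office-tools | convert_xbrl_to_excel.py | merge_ordered_items
-- ===== SOURCE A (Python) =====
-- def merge_ordered_items(master, new_items):
--     """Smart-merge create_hierarchy output tuples from new_items into master.
--
--     Items are (node_name, full_path, depth, pref_label) tuples.
--     Elements that exist in master are skipped.
--     New elements are inserted at the position dictated by their neighbors in new_items
--     that ARE already present in master — preserving relative order from the newer sequence.
--
--     Called newest-year-first so the newest year's sequence is the authoritative order,
--     and older years only contribute elements missing from newer years, placed correctly.
--     """
--     if not master:
--         return list(new_items)
--
--     # Index master by full_path for O(1) lookup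
--     path_to_pos = {item[1]: i for i, item in enumerate(master)}
--     result = list(master)
--
--     for ni, new_item in enumerate(new_items):
--         new_path = new_item[1]
--         if new_path in path_to_pos:
--             continue  # Already present
--
--         # Find the rightmost predecessor in new_items that is in result
--         insert_after = -1
--         for j in range(ni - 1, -1, -1):
--             p = new_items[j][1]
--             if p in path_to_pos:
--                 insert_after = path_to_pos[p]
--                 break
--
--         # Find the leftmost successor in new_items that is in result
--         insert_before = len(result)
--         for j in range(ni + 1, len(new_items)):
--             s = new_items[j][1]
--             if s in path_to_pos:
--                 insert_before = path_to_pos[s]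
--                 break
--
--         insert_pos = min(insert_after + 1, insert_before)
--         result.insert(insert_pos, new_item)
--
--         # Rebuild index (insert shifts all positions at/after insert_pos)
--         path_to_pos = {item[1]: i for i, item in enumerate(result)}
--
--     return result
-- ===== SOURCE B (Python) =====
-- # Alternative: no dict and no per-insert index rebuild; positions are read off the
-- # result list directly (last occurrence scanned from the end), and the predecessor
-- # position is carried across iterations (the rightmost present predecessor is always
-- # the immediately preceding new item once it has been processed).
--
-- def _last_pos(items, path):
--     for i in range(len(items) - 1, -1, -1):
--         if items[i][1] == path:
--             return i
--     return None
--
--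
-- def merge_ordered_items(master, new_items):
--     if not master:
--         return list(new_items)
--
--     result = list(master)
--     after = -1  # position in result of the previously processed new item
--     for ni, item in enumerate(new_items):
--         path = item[1]
--         p = _last_pos(result, path)
--         if p is not None:
--             after = p
--             continue
--         before = len(result)
--         for later in new_items[ni + 1:]:
--             q = _last_pos(result, later[1])
--             if q is not None:
--                 before = q
--                 break
--         pos = min(after + 1, before)
--         result.insert(pos, item)
--         after = pos
--     return result
-- ===== Notes on version B (the rewrite author's own statement) =====
-- stated objective: alternative
-- what changed: B drops the path->position dict and its full rebuild after every insert, and replaces A's backward scan for the rightmost present predecessor by carrying the previous item's position across iterations (it is always present after being processed); positions are read directly off the result list by an end-to-start scan.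
import Mathlib
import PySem

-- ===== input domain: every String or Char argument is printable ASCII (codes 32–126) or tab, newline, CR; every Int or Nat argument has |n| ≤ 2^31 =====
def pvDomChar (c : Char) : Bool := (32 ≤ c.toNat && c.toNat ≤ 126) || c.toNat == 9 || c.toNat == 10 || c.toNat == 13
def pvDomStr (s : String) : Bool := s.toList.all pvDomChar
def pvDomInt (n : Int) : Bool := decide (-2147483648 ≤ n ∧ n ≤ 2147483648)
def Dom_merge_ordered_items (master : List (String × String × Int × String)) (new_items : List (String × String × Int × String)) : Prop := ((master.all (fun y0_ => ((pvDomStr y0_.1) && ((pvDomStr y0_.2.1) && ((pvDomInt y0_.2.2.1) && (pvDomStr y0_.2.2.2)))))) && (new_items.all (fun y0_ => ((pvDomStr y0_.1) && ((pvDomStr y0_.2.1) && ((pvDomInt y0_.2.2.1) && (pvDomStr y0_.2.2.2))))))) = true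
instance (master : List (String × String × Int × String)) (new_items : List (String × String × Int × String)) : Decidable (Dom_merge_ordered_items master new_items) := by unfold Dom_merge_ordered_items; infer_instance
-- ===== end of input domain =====

-- B drops A's path->index dict (and its rebuild after every insert) and the backward
-- predecessor scan, carrying the previous item's position instead; same return value.


-- ===== PORT A =====
-- {item[1]: i for i, item in enumerate(l)} (dict comprehension: later duplicates overwrite)
def pvBuildIdxAux (l : List (String × String × Int × String)) (i : Int) (d : PySem.Dict String Int) : PySem.Dict String Int :=
  match l with
  | [] => d
  | it :: rest => pvBuildIdxAux rest (i + 1) (d.insert it.2.1 i)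

def pvBuildIdx (l : List (String × String × Int × String)) : PySem.Dict String Int :=
  pvBuildIdxAux l 0 PySem.Dict.empty

-- 'for j in range(ni-1,-1,-1): …break': the already-seen prefix is carried most-recent-first,
-- so iterating this list IS the backward index scan (all indices are in range)
def pvFindAfter (prevRev : List (String × String × Int × String)) (d : PySem.Dict String Int) : Int :=
  match prevRev with
  | [] => -1
  | it :: rest =>
    match d.get? it.2.1 with
    | some v => v
    | none => pvFindAfter rest d

-- 'for j in range(ni+1, len(new_items)): …break' over the remaining suffix
def pvFindBefore (suffix : List (String × String × Int × String)) (d : PySem.Dict String Int) (dflt : Int) : Int :=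
  match suffix with
  | [] => dflt
  | it :: rest =>
    match d.get? it.2.1 with
    | some v => v
    | none => pvFindBefore rest d dflt

def pvLoopA (result : List (String × String × Int × String)) (d : PySem.Dict String Int)
    (prevRev : List (String × String × Int × String)) :
    List (String × String × Int × String) → List (String × String × Int × String)
  | [] => result
  | it :: rest =>
    match d.get? it.2.1 with
    | some _ => pvLoopA result d (it :: prevRev) rest
    | none =>
      let after := pvFindAfter prevRev d
      let before := pvFindBefore rest d (result.length : Int)
      let pos := min (after + 1) before
      let result' := PySem.List.insert result pos it
      pvLoopA result' (pvBuildIdx result') (it :: prevRev) rest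

def merge_ordered_items (master : List (String × String × Int × String)) (new_items : List (String × String × Int × String)) : List (String × String × Int × String) :=
  if master = [] then new_items
  else pvLoopA master (pvBuildIdx master) [] new_items

-- ===== PORT B =====
-- Source B's _last_pos: index of the LAST occurrence of path (scan from the end), or None
def pvLastPosAux (items : List (String × String × Int × String)) (path : String) (i : Int) : Option Int :=
  match items with
  | [] => none
  | it :: rest =>
    match pvLastPosAux rest path (i + 1) with
    | some v => some v
    | none => if it.2.1 == path then some i else none

def pvLastPos (items : List (String × String × Int × String)) (path : String) : Option Int :=
  pvLastPosAux items path 0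

-- 'for later in new_items[ni+1:]: …break'
def pvFindBeforeB (result : List (String × String × Int × String)) :
    List (String × String × Int × String) → Int
  | [] => (result.length : Int)
  | it :: rest =>
    match pvLastPos result it.2.1 with
    | some q => q
    | none => pvFindBeforeB result rest

def pvLoopB (result : List (String × String × Int × String)) (after : Int) :
    List (String × String × Int × String) → List (String × String × Int × String)
  | [] => result
  | it :: rest =>
    match pvLastPos result it.2.1 with
    | some p => pvLoopB result p rest
    | none =>
      let before := pvFindBeforeB result rest
      let pos := min (after + 1) before
      pvLoopB (PySem.List.insert result pos it) pos rest

def merge_ordered_items_alt (master : List (String × String × Int × String)) (new_items : List (String × String × Int × String)) : List (String × String × Int × String) :=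
  if master = [] then new_items
  else pvLoopB master (-1) new_items

-- ===== PRECONDITION & SPEC =====
def Spec_merge_ordered_items (master : List (String × String × Int × String)) (new_items : List (String × String × Int × String)) (out : List (String × String × Int × String)) : Prop := out = merge_ordered_items_alt master new_items
instance (master : List (String × String × Int × String)) (new_items : List (String × String × Int × String)) (out : List (String × String × Int × String)) : Decidable (Spec_merge_ordered_items master new_items out) := by unfold Spec_merge_ordered_items; infer_instance

-- ===== CLAIM (what is proved, stated in full; the proofs are below) =====
def Claim_equal_merge_ordered_items : Prop := ∀ (master : List (String × String × Int × String)) (new_items : List (String × String × Int × String)), Dom_merge_ordered_items master new_items → Spec_merge_ordered_items master new_items (merge_ordered_items master new_items)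

-- ===== LEMMAS AND PROOFS =====

-- The dict built by A's comprehension looks up to the last occurrence index: exactly pvLastPosAux.
theorem pvBuildIdxAux_get? (l : List (String × String × Int × String)) (p : String) :
    ∀ (i : Int) (d : PySem.Dict String Int),
      (pvBuildIdxAux l i d).get? p =
        (match pvLastPosAux l p i with
         | some v => some v
         | none => d.get? p) := by
  induction l with
  | nil => intro i d; simp [pvBuildIdxAux, pvLastPosAux]
  | cons it rest ih =>
    intro i d
    simp only [pvBuildIdxAux, pvLastPosAux, ih]
    cases h : pvLastPosAux rest p (i + 1) with
    | some v => simp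
    | none =>
      rw [PySem.Dict.get?_insert]
      by_cases hp : p = it.2.1
      · simp [hp]
      · have hp' : ¬ it.2.1 = p := fun hx => hp hx.symm
        simp [hp, hp', beq_iff_eq]

theorem pvBuildIdx_get? (l : List (String × String × Int × String)) (p : String) :
    (pvBuildIdx l).get? p = pvLastPos l p := by
  unfold pvBuildIdx pvLastPos
  rw [pvBuildIdxAux_get?]
  cases h : pvLastPosAux l p 0 <;> simp [PySem.Dict.get?, PySem.Dict.empty]

theorem pvLastPosAux_bound (l : List (String × String × Int × String)) (p : String) :
    ∀ (i v : Int), pvLastPosAux l p i = some v → i ≤ v ∧ v < i + l.length := by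
  induction l with
  | nil => intro i v h; simp [pvLastPosAux] at h
  | cons it rest ih =>
    intro i v h
    simp only [pvLastPosAux] at h
    cases hr : pvLastPosAux rest p (i + 1) with
    | some w =>
      rw [hr] at h; simp at h; subst h
      have := ih (i + 1) w hr
      simp only [List.length_cons]
      push_cast
      omega
    | none =>
      rw [hr] at h
      split_ifs at h with hb
      · simp at h; subst h
        simp only [List.length_cons]
        push_cast
        omega

theorem pvFindBefore_eq (result : List (String × String × Int × String)) :
    ∀ (rest : List (String × String × Int × String)),
      pvFindBefore rest (pvBuildIdx result) (result.length : Int) = pvFindBeforeB result rest := by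
  intro rest
  induction rest with
  | nil => simp [pvFindBefore, pvFindBeforeB]
  | cons it r ih =>
    simp only [pvFindBefore, pvFindBeforeB, pvBuildIdx_get?]
    cases h : pvLastPos result it.2.1 <;> simp [ih]

theorem pvFindBeforeB_bound (result : List (String × String × Int × String)) :
    ∀ (rest : List (String × String × Int × String)),
      0 ≤ pvFindBeforeB result rest ∧ pvFindBeforeB result rest ≤ (result.length : Int) := by
  intro rest
  induction rest with
  | nil => simp [pvFindBeforeB]
  | cons it r ih =>
    simp only [pvFindBeforeB]
    cases h : pvLastPos result it.2.1 with
    | none => simpa using ih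
    | some q =>
      have hb := pvLastPosAux_bound result it.2.1 0 q h
      show 0 ≤ q ∧ q ≤ (result.length : Int)
      omega

-- whether a match is found does not depend on the starting index
theorem pvLastPosAux_none_shift (l : List (String × String × Int × String)) (p : String) :
    ∀ (i j : Int), pvLastPosAux l p i = none → pvLastPosAux l p j = none := by
  induction l with
  | nil => intro i j _; simp [pvLastPosAux]
  | cons it rest ih =>
    intro i j h
    simp only [pvLastPosAux] at h ⊢
    cases hr : pvLastPosAux rest p (i + 1) with
    | some v => rw [hr] at h; simp at h
    | none =>
      rw [hr] at h
      rw [ih (i + 1) (j + 1) hr]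
      split_ifs at h ⊢ with hb
      all_goals simp_all

theorem pvLastPosAux_append (a b : List (String × String × Int × String)) (p : String) :
    ∀ (i : Int), pvLastPosAux (a ++ b) p i =
      (match pvLastPosAux b p (i + a.length) with
       | some v => some v
       | none => pvLastPosAux a p i) := by
  induction a with
  | nil =>
    intro i
    simp only [List.nil_append, List.length_nil, Int.natCast_zero, add_zero]
    cases hb : pvLastPosAux b p i <;> simp [pvLastPosAux]
  | cons it rest ih =>
    intro i
    simp only [List.cons_append, pvLastPosAux, ih]
    have harith : i + 1 + (rest.length : Int) = i + ((it :: rest).length : Int) := by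
      simp only [List.length_cons]
      push_cast
      omega
    rw [harith]
    cases hb : pvLastPosAux b p (i + ((it :: rest).length : Int)) <;>
      cases hr : pvLastPosAux rest p (i + 1) <;> simp

theorem pvLastPos_insert_self (result : List (String × String × Int × String))
    (it : String × String × Int × String) (pos : Int)
    (habs : pvLastPos result it.2.1 = none) (h0 : 0 ≤ pos) (hlen : pos ≤ (result.length : Int)) :
    pvLastPos (PySem.List.insert result pos it) it.2.1 = some pos := by
  have hle : pos.toNat ≤ result.length := by omega
  have hins : PySem.List.insert result pos it =
      result.take pos.toNat ++ it :: result.drop pos.toNat := by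
    rw [← Int.toNat_of_nonneg h0]
    exact PySem.List.insert_natCast result pos.toNat it hle
  have htklen : ((result.take pos.toNat).length : Int) = pos := by
    rw [List.length_take]
    omega
  have hsplit : pvLastPosAux (result.take pos.toNat ++ result.drop pos.toNat) it.2.1 0 = none := by
    rw [List.take_append_drop]
    exact habs
  rw [pvLastPosAux_append] at hsplit
  unfold pvLastPos
  rw [hins]
  cases hd : pvLastPosAux (result.drop pos.toNat) it.2.1 (0 + ((result.take pos.toNat).length : Int)) with
  | some v => rw [hd] at hsplit; simp at hsplit
  | none =>
    rw [hd] at hsplit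
    rw [pvLastPosAux_append]
    have hdrop : pvLastPosAux (result.drop pos.toNat) it.2.1
        ((0 + ((result.take pos.toNat).length : Int)) + 1) = none :=
      pvLastPosAux_none_shift _ _ _ _ hd
    have hcons : pvLastPosAux (it :: result.drop pos.toNat) it.2.1
        (0 + ((result.take pos.toNat).length : Int)) = some pos := by
      simp only [pvLastPosAux]
      rw [hdrop]
      simp [List.length_take]
      omega
    rw [hcons]

theorem pvLoop_eq (rest : List (String × String × Int × String)) :
    ∀ (result prevRev : List (String × String × Int × String)) (after : Int),
      pvFindAfter prevRev (pvBuildIdx result) = after →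
      (after = -1 ∨ (0 ≤ after ∧ after < (result.length : Int))) →
      pvLoopA result (pvBuildIdx result) prevRev rest = pvLoopB result after rest := by
  induction rest with
  | nil => intro result prevRev after _ _; simp [pvLoopA, pvLoopB]
  | cons it r ih =>
    intro result prevRev after hfa hbd
    simp only [pvLoopA, pvLoopB, pvBuildIdx_get?]
    cases h : pvLastPos result it.2.1 with
    | some p =>
      apply ih
      · simp only [pvFindAfter, pvBuildIdx_get?, h]
      · right
        have := pvLastPosAux_bound result it.2.1 0 p h
        simpa using this
    | none =>
      rw [hfa, pvFindBefore_eq]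
      have hbb := pvFindBeforeB_bound result r
      have h0 : 0 ≤ min (after + 1) (pvFindBeforeB result r) := by omega
      have hl : min (after + 1) (pvFindBeforeB result r) ≤ (result.length : Int) := by omega
      have hself := pvLastPos_insert_self result it (min (after + 1) (pvFindBeforeB result r)) h h0 hl
      have hlength : ((PySem.List.insert result (min (after + 1) (pvFindBeforeB result r)) it).length : Int)
          = (result.length : Int) + 1 := by
        have hle : (min (after + 1) (pvFindBeforeB result r)).toNat ≤ result.length := by omega
        rw [← Int.toNat_of_nonneg h0, PySem.List.insert_natCast result _ it hle]
        simp
      apply ih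
      · simp only [pvFindAfter, pvBuildIdx_get?, hself]
      · right
        constructor
        · exact h0
        · omega

-- ===== VERDICT (by name: the statement is the Claim_ definition above) =====
theorem merge_ordered_items_spec : Claim_equal_merge_ordered_items := by
  intro master new_items _
  unfold Spec_merge_ordered_items merge_ordered_items merge_ordered_items_alt
  by_cases h : master = []
  · simp [h]
  · simp only [h, if_false]
    exact pvLoop_eq new_items master [] (-1) rfl (Or.inl rfl)
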